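-- pv_equiv track=rewrite | github.com/willwade/WorldAlphabets | scripts/fetch_leipzig_corpora.py | choose_corpus
-- ===== SOURCE A (Python) =====
-- from typing import Dict, Iterable, List, Sequence, Any
--
-- def choose_corpus(corpora: Sequence[str]) -> str | None:
--     if not corpora:
--         return None
--     priority = [
--         "_community_",
--         "_news_",
--         "_mixed_",
--         "_web_",
--         "_newscrawl_",
--         "_wikipedia_",
--     ]
--     for token in priority:
--         for corpus_id in corpora:
--             if token in corpus_id:
--                 return corpus_id
--     return corpora[0]
-- ===== SOURCE B (Python) =====
-- def choose_corpus(corpora):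
--     if not corpora:
--         return None
--     priority = [
--         "_community_",
--         "_news_",
--         "_mixed_",
--         "_web_",
--         "_newscrawl_",
--         "_wikipedia_",
--     ]
--
--     def rank(cid):
--         return next((i for i, t in enumerate(priority) if t in cid), len(priority))
--
--     return min(corpora, key=rank)
-- ===== Notes on version B (the rewrite author's own statement) =====
-- stated objective: idiomatic
-- what changed: Replaces the nested priority-outer/corpora-inner early-exit loops by a single keyed pass: each corpus gets a rank (index of the first priority token it contains, len(priority) if none) and min(corpora, key=rank) picks the winner, with min's first-wins tie-break reproducing A's list-order tie-break and the all-rank-6 case reproducing A's corpora[0] fallback.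
import Mathlib
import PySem

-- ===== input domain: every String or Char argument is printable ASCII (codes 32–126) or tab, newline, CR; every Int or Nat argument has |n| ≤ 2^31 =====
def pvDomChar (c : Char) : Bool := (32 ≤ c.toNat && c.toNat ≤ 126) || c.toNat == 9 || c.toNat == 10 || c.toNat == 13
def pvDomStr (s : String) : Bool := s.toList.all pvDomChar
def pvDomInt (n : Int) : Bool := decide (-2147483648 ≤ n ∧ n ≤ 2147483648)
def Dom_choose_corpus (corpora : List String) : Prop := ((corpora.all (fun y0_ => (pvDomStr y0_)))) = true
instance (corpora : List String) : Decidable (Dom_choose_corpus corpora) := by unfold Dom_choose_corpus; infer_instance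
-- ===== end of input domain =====

-- B re-implements A's nested priority/corpora early-exit loops as a single keyed
-- pass: min(corpora, key=rank) with rank = index of first priority token contained.


-- ===== PORT A =====
def pvPriorityA : List String :=
  ["_community_", "_news_", "_mixed_", "_web_", "_newscrawl_", "_wikipedia_"]

-- inner loop: 'for corpus_id in corpora: if token in corpus_id: return corpus_id'
def pvInnerA (token : String) : List String → Option String
  | [] => none
  | c :: rest => if PySem.Str.isIn token c then some c else pvInnerA token rest

-- outer loop: 'for token in priority: …' with the early return propagated
def pvOuterA : List String → List String → Option String
  | [], _ => none
  | t :: ts, cs =>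
    match pvInnerA t cs with
    | some c => some c
    | none => pvOuterA ts cs

def choose_corpus (corpora : List String) : Option String :=
  if corpora = [] then none
  else
    match pvOuterA pvPriorityA corpora with
    | some c => some c
    | none => corpora.head?   -- 'return corpora[0]'; corpora ≠ [] here

-- ===== PORT B =====
def pvPriorityB : List String :=
  ["_community_", "_news_", "_mixed_", "_web_", "_newscrawl_", "_wikipedia_"]

-- rank(cid) = next((i for i, t in enumerate(priority) if t in cid), len(priority))
def pvRankB (cid : String) : Int :=
  match (PySem.List.enumerate pvPriorityB).find? (fun p => PySem.Str.isIn p.2 cid) with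
  | some p => p.1
  | none => (pvPriorityB.length : Int)

def choose_corpus_alt (corpora : List String) : Option String :=
  if corpora = [] then none
  else PySem.List.min? corpora pvRankB

-- ===== PRECONDITION & SPEC =====
def Spec_choose_corpus (corpora : List String) (out : Option String) : Prop := out = choose_corpus_alt corpora
instance (corpora : List String) (out : Option String) : Decidable (Spec_choose_corpus corpora out) := by unfold Spec_choose_corpus; infer_instance

-- ===== CLAIM (what is proved, stated in full; the proofs are below) =====
def Claim_equal_choose_corpus : Prop := ∀ (corpora : List String), Dom_choose_corpus corpora → Spec_choose_corpus corpora (choose_corpus corpora)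

-- ===== LEMMAS AND PROOFS =====

-- proof-side rank: index (into ts) of the first token contained in c, ts.length if none
def rkL : List String → String → Nat
  | [], _ => 0
  | t :: ts, c => if PySem.Str.isIn t c then 0 else rkL ts c + 1

-- the fold step of PySem.List.min?
def mstep (k : String → Nat) (acc : Option String) (x : String) : Option String :=
  match acc with
  | none => some x
  | some m => if k x < k m then some x else some m

theorem min?_eq_foldl_mstep (cs : List String) (k : String → Nat) :
    PySem.List.min? cs k = cs.foldl (mstep k) none := by
  unfold PySem.List.min?
  congr 1
  funext acc x
  rcases acc with _ | m <;> rfl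

theorem foldl_mstep_stay_zero (k : String → Nat) (c0 : String) (h0 : k c0 = 0) :
    ∀ cs : List String, cs.foldl (mstep k) (some c0) = some c0 := by
  intro cs
  induction cs with
  | nil => rfl
  | cons x rest ih =>
    simp only [List.foldl, mstep, h0]
    rw [if_neg (by omega)]
    exact ih

theorem foldl_mstep_first_zero (k : String → Nat) (c0 : String) :
    ∀ (cs : List String) (acc : Option String),
      (acc = none ∨ ∃ m, acc = some m ∧ k m ≠ 0) →
      cs.find? (fun c => k c == 0) = some c0 →
      cs.foldl (mstep k) acc = some c0 := by
  intro cs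
  induction cs with
  | nil => intro acc _ hf; simp at hf
  | cons x rest ih =>
    intro acc hacc hf
    by_cases hx : k x = 0
    · have hc0 : x = c0 := by
        simp [List.find?_cons, hx] at hf
        exact hf
      subst hc0
      have hstep : mstep k acc x = some x := by
        rcases hacc with h | ⟨m, hm, hkm⟩
        · simp [mstep, h]
        · simp [mstep, hm]; omega
      simp only [List.foldl, hstep]
      exact foldl_mstep_stay_zero k x hx rest
    · have hf' : rest.find? (fun c => k c == 0) = some c0 := by
        simpa [List.find?_cons, hx] using hf
      have hstep : (mstep k acc x = some x) ∨ (∃ m, mstep k acc x = some m ∧ k m ≠ 0) := by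
        rcases hacc with h | ⟨m, hm, hkm⟩
        · left; simp [mstep, h]
        · subst hm
          simp only [mstep]
          by_cases hlt : k x < k m
          · left; simp [hlt]
          · right; exact ⟨m, by simp [hlt], hkm⟩
      simp only [List.foldl]
      rcases hstep with h | ⟨m, hm, hkm⟩
      · rw [h]; exact ih _ (Or.inr ⟨x, rfl, hx⟩) hf'
      · rw [hm]; exact ih _ (Or.inr ⟨m, rfl, hkm⟩) hf'

theorem min?_first_zero (k : String → Nat) (cs : List String) (c0 : String)
    (hf : cs.find? (fun c => k c == 0) = some c0) :
    PySem.List.min? cs k = some c0 := by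
  rw [min?_eq_foldl_mstep]
  exact foldl_mstep_first_zero k c0 cs none (Or.inl rfl) hf

theorem foldl_mstep_congr (k1 k2 : String → Nat) :
    ∀ (cs : List String) (acc : Option String),
      (∀ c ∈ cs, k1 c = k2 c) →
      (∀ m, acc = some m → k1 m = k2 m) →
      cs.foldl (mstep k1) acc = cs.foldl (mstep k2) acc := by
  intro cs
  induction cs with
  | nil => intro _ _ _; rfl
  | cons x rest ih =>
    intro acc hmem hacc
    have hx : k1 x = k2 x := hmem x (by simp)
    have hstep : mstep k1 acc x = mstep k2 acc x := by
      rcases acc with _ | m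
      · rfl
      · simp only [mstep, hx, hacc m rfl]
    simp only [List.foldl, hstep]
    refine ih _ (fun c hc => hmem c (by simp [hc])) ?_
    intro m hm
    rcases acc with _ | m'
    · simp only [mstep] at hm; cases hm; exact hx
    · simp only [mstep] at hm
      split at hm
      · cases hm; exact hx
      · cases hm; exact hacc _ rfl

theorem min?_congr_mem (k1 k2 : String → Nat) (cs : List String)
    (h : ∀ c ∈ cs, k1 c = k2 c) :
    PySem.List.min? cs k1 = PySem.List.min? cs k2 := by
  rw [min?_eq_foldl_mstep, min?_eq_foldl_mstep]
  exact foldl_mstep_congr k1 k2 cs none h (by intro m hm; cases hm)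

theorem min?_succ (k : String → Nat) (cs : List String) :
    PySem.List.min? cs (fun c => k c + 1) = PySem.List.min? cs k := by
  rw [min?_eq_foldl_mstep, min?_eq_foldl_mstep]
  have : mstep (fun c => k c + 1) = mstep k := by
    funext acc x
    rcases acc with _ | m
    · rfl
    · simp only [mstep, Nat.add_lt_add_iff_right]
  rw [this]

theorem min?_natCast (k : String → Nat) (cs : List String) :
    PySem.List.min? cs (fun c => ((k c : Nat) : Int)) = PySem.List.min? cs k := by
  unfold PySem.List.min?
  congr 1
  funext acc x
  rcases acc with _ | m
  · rfl
  · simp only [Nat.cast_lt]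

theorem innerA_eq_find? (t : String) (cs : List String) :
    pvInnerA t cs = cs.find? (fun c => PySem.Str.isIn t c) := by
  induction cs with
  | nil => rfl
  | cons c rest ih =>
    rw [List.find?_cons]
    cases h : PySem.Str.isIn t c
    · show (if PySem.Str.isIn t c = true then some c else pvInnerA t rest) = _
      simp only [h, ih]
      simp
    · show (if PySem.Str.isIn t c = true then some c else pvInnerA t rest) = _
      simp only [h]
      simp

theorem main_lemma (ts : List String) :
    ∀ cs : List String, cs ≠ [] →
      (match pvOuterA ts cs with
       | some c => some c
       | none => cs.head?) = PySem.List.min? cs (rkL ts) := by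
  induction ts with
  | nil =>
    intro cs hne
    rcases cs with _ | ⟨c, rest⟩
    · exact absurd rfl hne
    · have : (c :: rest).find? (fun c => rkL [] c == 0) = some c := by
        simp [rkL]
      rw [min?_first_zero _ _ _ this]
      rfl
  | cons t ts ih =>
    intro cs hne
    rcases h : pvInnerA t cs with _ | c0
    · -- no corpus contains t: shift ranks and recurse
      have hfind : cs.find? (fun c => PySem.Str.isIn t c) = none := by
        rw [← innerA_eq_find?]; exact h
      have hnone := List.find?_eq_none.mp hfind
      have hk : ∀ c ∈ cs, rkL (t :: ts) c = rkL ts c + 1 := by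
        intro c hc
        have : PySem.Str.isIn t c ≠ true := hnone c hc
        simp only [rkL, if_neg this]
      rw [min?_congr_mem _ (fun c => rkL ts c + 1) cs hk, min?_succ]
      have houter : pvOuterA (t :: ts) cs = pvOuterA ts cs := by
        simp [pvOuterA, h]
      rw [houter]
      exact ih cs hne
    · -- c0 is the first corpus containing t; its rank is 0
      have hf : cs.find? (fun c => rkL (t :: ts) c == 0) = some c0 := by
        rw [innerA_eq_find?] at h
        have hpred : (fun c => rkL (t :: ts) c == 0) = (fun c => PySem.Str.isIn t c) := by
          funext c
          cases hc : PySem.Str.isIn t c <;> simp [rkL, hc] <;> simpa using hc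
        rw [hpred]
        exact h
      rw [min?_first_zero _ _ _ hf]
      simp [pvOuterA, h]

theorem rankB_eq_rkL (c : String) : pvRankB c = ((rkL pvPriorityA c : Nat) : Int) := by
  have henum : PySem.List.enumerate ["_community_", "_news_", "_mixed_", "_web_", "_newscrawl_", "_wikipedia_"] =
      [((0:Int),"_community_"),(1,"_news_"),(2,"_mixed_"),(3,"_web_"),(4,"_newscrawl_"),(5,"_wikipedia_")] := by
    decide
  simp only [pvRankB, henum, pvPriorityA, pvPriorityB, rkL, List.length, List.find?_cons]
  cases h1 : PySem.Str.isIn "_community_" c <;>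
    cases h2 : PySem.Str.isIn "_news_" c <;>
    cases h3 : PySem.Str.isIn "_mixed_" c <;>
    cases h4 : PySem.Str.isIn "_web_" c <;>
    cases h5 : PySem.Str.isIn "_newscrawl_" c <;>
    cases h6 : PySem.Str.isIn "_wikipedia_" c <;>
    simp [h1, h2, h3, h4, h5, h6]

-- ===== VERDICT (by name: the statement is the Claim_ definition above) =====
theorem choose_corpus_spec : Claim_equal_choose_corpus := by
  intro cs _
  unfold Spec_choose_corpus choose_corpus choose_corpus_alt
  by_cases hne : cs = []
  · simp [hne]
  · rw [if_neg hne, if_neg hne]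
    have hB : PySem.List.min? cs pvRankB = PySem.List.min? cs (rkL pvPriorityA) := by
      have : pvRankB = fun c => ((rkL pvPriorityA c : Nat) : Int) := by
        funext c; exact rankB_eq_rkL c
      rw [this, min?_natCast]
    rw [hB]
    exact main_lemma pvPriorityA cs hne
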